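-- pv_equiv track=rewrite | github.com/thejurio/D-deskcal | rrule_parser.py | _extract_count
-- ===== SOURCE A (Python) =====
-- def _extract_count(rrule_string):
--     """RRULE 문자열에서 COUNT 값 추출"""
--     try:
--         parts = rrule_string.split(';')
--         for part in parts:
--             if part.startswith('COUNT='):
--                 return part.split('=')[1]
--     except:
--         pass
--     return "여러"
-- ===== SOURCE B (Python) =====
-- def _extract_count(rrule_string):
--     """RRULE 문자열에서 COUNT 값 추출 (single pass, no intermediate parts list)"""
--     try:
--         s = rrule_string
--         n = len(s)
--         i = 0
--         at_start = True          # are we at the beginning of a ';'-delimited part?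
--         while i < n:
--             if at_start and s.startswith('COUNT=', i):
--                 j = i + 6
--                 k = j
--                 while k < n and s[k] != ';' and s[k] != '=':
--                     k += 1
--                 return s[j:k]
--             at_start = s[i] == ';'
--             i += 1
--     except (TypeError, AttributeError):
--         pass
--     return "여러"
-- ===== Notes on version B (the rewrite author's own statement) =====
-- stated objective: alternative
-- what changed: Replaces split(';') + loop over parts + inner split('=') with a single left-to-right character scan that checks for 'COUNT=' only at part boundaries and slices the value up to the next ';' or '=', building no intermediate lists.
import Mathlib
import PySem

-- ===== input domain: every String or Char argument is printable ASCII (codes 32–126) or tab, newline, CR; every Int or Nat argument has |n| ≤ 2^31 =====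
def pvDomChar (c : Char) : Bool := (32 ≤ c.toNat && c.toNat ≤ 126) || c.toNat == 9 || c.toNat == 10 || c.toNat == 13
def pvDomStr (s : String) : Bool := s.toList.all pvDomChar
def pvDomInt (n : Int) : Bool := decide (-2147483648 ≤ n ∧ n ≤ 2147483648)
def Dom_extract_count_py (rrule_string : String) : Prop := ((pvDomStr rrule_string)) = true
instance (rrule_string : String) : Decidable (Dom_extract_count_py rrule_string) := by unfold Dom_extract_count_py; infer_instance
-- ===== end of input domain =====

-- B replaces A's split(';') + loop over parts + inner split('=') by a single left-to-right
-- character scan with an at_start flag (alternative decomposition; same return value, proved below).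

-- ===== PORT A =====
-- for part in rrule_string.split(';'): if part.startswith('COUNT='): return part.split('=')[1]; else fall through → "여러"
def extractGoA : List String → String
  | [] => "여러"
  | p :: rest =>
    if PySem.Str.startswith p "COUNT=" then
      match PySem.List.pyGet? (match PySem.Str.split? p "=" with | some l => l | none => []) 1 with
      | some v => v
      | none => "여러"
    else extractGoA rest

def extract_count_py (rrule_string : String) : String :=
  match PySem.Str.split? rrule_string ";" with
  | some parts => extractGoA parts
  | none => "여러"

-- ===== PORT B =====
def altTake : List Char → List Char
  | [] => []
  | c :: cs => if c == ';' || c == '=' then [] else c :: altTake cs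

def altScan : List Char → Bool → String
  | [], _ => "여러"
  | c :: cs, atStart =>
    if atStart && PySem.Chars.startswith (c :: cs) ['C','O','U','N','T','='] then
      String.ofList (altTake ((c :: cs).drop 6))
    else altScan cs (c == ';')

def extract_count_py_alt (rrule_string : String) : String :=
  altScan rrule_string.toList true

-- ===== PRECONDITION & SPEC =====
-- A never raises on a str argument (the bare except catches everything and returns "여러"), so no Pre_.
def Spec_extract_count_py (rrule_string : String) (out : String) : Prop := out = extract_count_py_alt rrule_string
instance (rrule_string : String) (out : String) : Decidable (Spec_extract_count_py rrule_string out) := by unfold Spec_extract_count_py; infer_instance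

-- ===== CLAIM (what is proved, stated in full; the proofs are below) =====
def Claim_equal_extract_count_py : Prop := ∀ (rrule_string : String), Dom_extract_count_py rrule_string → Spec_extract_count_py rrule_string (extract_count_py rrule_string)

-- ===== LEMMAS AND PROOFS =====

def goAC : List (List Char) → String
  | [] => "여러"
  | p :: rest =>
    if PySem.Chars.startswith p ['C','O','U','N','T','='] then
      match PySem.List.pyGet? (PySem.Chars.splitOn p ['=']) 1 with
      | some v => String.ofList v
      | none => "여러"
    else goAC rest

theorem splitOn_single_go (c : Char) :
    ∀ (fuel : Nat) (l cur : List Char) (acc : List (List Char)), l.length < fuel →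
      PySem.Chars.splitOn.go [c] fuel l cur acc
        = acc.reverse ++ List.modifyHead (cur.reverse ++ ·) (List.splitOnP (· == c) l) := by
  intro fuel
  induction fuel with
  | zero => intro l cur acc h; omega
  | succ fuel ih =>
    intro l cur acc h
    cases l with
    | nil =>
      simp [PySem.Chars.splitOn.go, List.splitOnP_nil, List.modifyHead]
    | cons c0 rest =>
      by_cases hc : c0 = c
      · subst hc
        have hpre : List.isPrefixOf [c0] (c0 :: rest) = true := by
          simp [List.isPrefixOf]
        rw [PySem.Chars.splitOn.go]
        simp only [hpre, if_true, List.length_cons, List.length_nil, List.drop_succ_cons, List.drop_zero]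
        rw [ih rest [] (cur.reverse :: acc) (by simpa using Nat.lt_of_succ_lt_succ h)]
        rw [List.splitOnP_cons]
        simp only [beq_self_eq_true, if_true, List.modifyHead, List.reverse_cons,
          List.append_assoc, List.cons_append, List.nil_append, List.append_nil]
        cases h' : List.splitOnP (fun x => x == c0) rest <;> simp [h']
      · have hpre : List.isPrefixOf [c] (c0 :: rest) = false := by
          simp [List.isPrefixOf, List.isPrefixOf_iff_prefix]
          intro hcc; exact absurd hcc.symm hc
        rw [PySem.Chars.splitOn.go]
        simp only [hpre, Bool.false_eq_true, if_false]
        rw [ih rest (c0 :: cur) acc (by simpa using Nat.lt_of_succ_lt_succ h)]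
        rw [List.splitOnP_cons]
        have hfc : ((c0 == c) = true) = False := by simp [hc]
        simp only [beq_iff_eq, hc, if_false, hfc]
        cases hsp : List.splitOnP (· == c) rest with
        | nil => simp [List.modifyHead]
        | cons hd tl => simp [List.modifyHead, List.append_assoc]

theorem splitOn_single (c : Char) (cs : List Char) :
    PySem.Chars.splitOn cs [c] = List.splitOnP (· == c) cs := by
  unfold PySem.Chars.splitOn
  rw [splitOn_single_go c (cs.length + 1) cs [] [] (by omega)]
  cases hsp : List.splitOnP (· == c) cs with
  | nil => simp [List.modifyHead]
  | cons hd tl => simp [List.modifyHead]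

theorem splitOnP_head (p : Char → Bool) (cs : List Char) :
    ∃ rest, List.splitOnP p cs = cs.takeWhile (fun a => !p a) :: rest := by
  induction cs with
  | nil => exact ⟨[], by simp [List.splitOnP_nil]⟩
  | cons a cs ih =>
    by_cases h : p a = true
    · exact ⟨List.splitOnP p cs, by simp [List.splitOnP_cons, h, List.takeWhile_cons]⟩
    · obtain ⟨rest, hr⟩ := ih
      refine ⟨rest, ?_⟩
      simp only [List.splitOnP_cons, h, if_false, hr, List.modifyHead,
        List.takeWhile_cons, Bool.not_eq_true'] at *
      simp [h, hr, List.modifyHead]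

theorem prefix_takeWhile_iff (pat cs : List Char) (pred : Char → Bool)
    (h : ∀ a ∈ pat, pred a = true) :
    pat <+: cs ↔ pat <+: cs.takeWhile pred := by
  constructor
  · intro hp
    induction pat generalizing cs with
    | nil => simp
    | cons a pat ih =>
      cases cs with
      | nil => exact absurd hp (by simp)
      | cons b cs =>
        rw [List.cons_prefix_cons] at hp
        obtain ⟨rfl, hp'⟩ := hp
        rw [List.takeWhile_cons, h a (by simp)]
        simpa [List.cons_prefix_cons] using
          ih cs (fun x hx => h x (by simp [hx])) hp'
  · intro hp
    exact hp.trans (List.takeWhile_prefix pred)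

theorem altTake_eq (v : List Char) :
    altTake v = (v.takeWhile (fun a => !(a == ';'))).takeWhile (fun a => !(a == '=')) := by
  induction v with
  | nil => simp [altTake]
  | cons a v ih =>
    cases h1 : a == ';' <;> cases h2 : a == '=' <;>
      simp [altTake, h1, h2, List.takeWhile_cons, ih]

theorem sw_nil : PySem.Chars.startswith ([] : List Char) ['C','O','U','N','T','='] = false := by
  rw [← Bool.not_eq_true]
  intro hc
  have h := (PySem.Chars.startswith_iff _ _).1 hc
  simp [List.prefix_nil] at h

theorem scan_eq (cs : List Char) :
    altScan cs true = goAC (List.splitOnP (· == ';') cs)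
      ∧ altScan cs false = goAC (List.splitOnP (· == ';') cs).tail := by
  induction cs with
  | nil =>
    constructor <;> simp [altScan, goAC, List.splitOnP_nil, sw_nil]
  | cons c cs ih =>
    have hpat : ∀ a ∈ (['C','O','U','N','T','='] : List Char), (!(a == ';')) = true := by
      intro a ha
      simp only [List.mem_cons, List.not_mem_nil, or_false] at ha
      rcases ha with rfl | rfl | rfl | rfl | rfl | rfl <;> rfl
    constructor
    · by_cases hpre : (['C','O','U','N','T','='] : List Char) <+: (c :: cs)
      · have hsw : PySem.Chars.startswith (c :: cs) ['C','O','U','N','T','='] = true :=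
          (PySem.Chars.startswith_iff _ _).2 hpre
        obtain ⟨v, hv⟩ := hpre
        -- hv : ['C','O','U','N','T','='] ++ v = c :: cs
        rw [altScan, hsw]
        simp only [Bool.true_and, if_true]
        rw [← hv]
        obtain ⟨rest, hr⟩ := splitOnP_head (· == ';') v
        obtain ⟨rest2, hr2⟩ := splitOnP_head (· == '=') (v.takeWhile (fun a => !(a == ';')))
        have hLsplit : List.splitOnP (· == ';') (['C','O','U','N','T','='] ++ v)
            = (['C','O','U','N','T','='] ++ v.takeWhile (fun a => !(a == ';'))) :: rest := by
          simp [List.splitOnP_cons, hr, List.modifyHead]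
        rw [hLsplit, goAC]
        have hsw2 : PySem.Chars.startswith
            (['C','O','U','N','T','='] ++ v.takeWhile (fun a => !(a == ';')))
            ['C','O','U','N','T','='] = true :=
          (PySem.Chars.startswith_iff _ _).2 ⟨_, rfl⟩
        rw [hsw2]
        simp only [if_true]
        rw [splitOn_single]
        have hsplit2 : List.splitOnP (· == '=') (['C','O','U','N','T','='] ++ v.takeWhile (fun a => !(a == ';')))
            = ['C','O','U','N','T'] :: (v.takeWhile (fun a => !(a == ';'))).takeWhile (fun a => !(a == '=')) :: rest2 := by
          simp [List.splitOnP_cons, hr2, List.modifyHead]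
        rw [hsplit2]
        have hget : PySem.List.pyGet?
            (['C','O','U','N','T'] :: (v.takeWhile (fun a => !(a == ';'))).takeWhile (fun a => !(a == '=')) :: rest2) (1 : Int)
            = some ((v.takeWhile (fun a => !(a == ';'))).takeWhile (fun a => !(a == '='))) := by
          have := PySem.List.pyGet?_natCast
            (['C','O','U','N','T'] :: (v.takeWhile (fun a => !(a == ';'))).takeWhile (fun a => !(a == '=')) :: rest2) 1
          simpa using this
        rw [hget]
        simp [altTake_eq]
      · have hsw : PySem.Chars.startswith (c :: cs) ['C','O','U','N','T','='] = false := by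
          rw [← Bool.not_eq_true]
          intro hcon
          exact hpre ((PySem.Chars.startswith_iff _ _).1 hcon)
        rw [altScan, hsw]
        simp only [Bool.and_false, Bool.true_and, Bool.false_eq_true, if_false]
        by_cases hc : c = ';'
        · subst hc
          rw [List.splitOnP_cons]
          simp only [beq_self_eq_true, if_true]
          rw [goAC]
          simpa [sw_nil]
            using ih.1
        · obtain ⟨rest, hr⟩ := splitOnP_head (· == ';') cs
          rw [List.splitOnP_cons]
          simp only [beq_iff_eq, hc, if_false]
          rw [hr]
          simp only [List.modifyHead]
          rw [goAC]
          have hsw3 : PySem.Chars.startswith (c :: cs.takeWhile (fun a => !(a == ';')))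
              ['C','O','U','N','T','='] = false := by
            rw [← Bool.not_eq_true]
            intro hcon
            have h1 := (PySem.Chars.startswith_iff _ _).1 hcon
            have h2 : (c :: cs.takeWhile (fun a => !(a == ';'))) = (c :: cs).takeWhile (fun a => !(a == ';')) := by
              simp [List.takeWhile_cons, hc]
            rw [h2] at h1
            exact hpre ((prefix_takeWhile_iff _ _ _ hpat).2 h1)
          rw [hsw3]
          simp only [Bool.false_eq_true, if_false]
          have hcb : (c == ';') = false := by simp [hc]
          rw [hcb]
          have := ih.2
          rw [hr] at this
          simpa using this
    · rw [altScan]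
      simp only [Bool.false_and, Bool.false_eq_true, if_false]
      by_cases hc : c = ';'
      · subst hc
        rw [List.splitOnP_cons]
        simp only [beq_self_eq_true, if_true]
        simpa using ih.1
      · rw [List.splitOnP_cons]
        simp only [beq_iff_eq, hc, if_false]
        have hcb : (c == ';') = false := by simp [hc]
        rw [hcb]
        cases hsp : List.splitOnP (· == ';') cs with
        | nil => simpa [hsp, List.modifyHead] using ih.2
        | cons hd tl =>
          have := ih.2
          rw [hsp] at this
          simpa [List.modifyHead] using this

theorem goA_eq (parts : List String) :
    extractGoA parts = goAC (parts.map String.toList) := by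
  induction parts with
  | nil => rfl
  | cons p rest ih =>
    simp only [List.map_cons]
    rw [extractGoA, goAC]
    have hsw : PySem.Str.startswith p "COUNT=" = PySem.Chars.startswith p.toList ['C','O','U','N','T','='] := by
      simpa using PySem.Str.startswith_eq p "COUNT="
    rw [hsw]
    by_cases h : PySem.Chars.startswith p.toList ['C','O','U','N','T','='] = true
    · rw [h]
      simp only [if_true]
      have hmap := PySem.Str.split?_map p "="
      have hs2 : PySem.Chars.split? p.toList ['='] = some (PySem.Chars.splitOn p.toList ['=']) := by
        simp [PySem.Chars.split?]
      rw [show ("=" : String).toList = ['='] from rfl, hs2] at hmap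
      cases hq : PySem.Str.split? p "=" with
      | none => rw [hq] at hmap; simp at hmap
      | some l =>
        rw [hq] at hmap
        simp only [Option.map_some, Option.some_inj] at hmap
        rw [show (match some l with | some l => l | none => ([] : List String)) = l from rfl]
        rw [← hmap]
        have hg1 : PySem.List.pyGet? l (1 : Int) = l[1]? := by
          simpa using PySem.List.pyGet?_natCast l 1
        have hg2 : PySem.List.pyGet? (l.map String.toList) (1 : Int) = (l.map String.toList)[1]? := by
          simpa using PySem.List.pyGet?_natCast (l.map String.toList) 1
        rw [hg1, hg2, List.getElem?_map]
        cases hv : l[1]? with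
        | none => simp
        | some v => simp
    · rw [Bool.not_eq_true] at h
      rw [h]
      simpa using ih

-- ===== VERDICT (by name: the statement is the Claim_ definition above) =====
theorem extract_count_py_spec : Claim_equal_extract_count_py := by
  intro s _
  unfold Spec_extract_count_py extract_count_py extract_count_py_alt
  have hmap := PySem.Str.split?_map s ";"
  have hs2 : PySem.Chars.split? s.toList [';'] = some (PySem.Chars.splitOn s.toList [';']) := by
    simp [PySem.Chars.split?]
  rw [show (";" : String).toList = [';'] from rfl, hs2] at hmap
  cases hq : PySem.Str.split? s ";" with
  | none => rw [hq] at hmap; simp at hmap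
  | some parts =>
    rw [hq] at hmap
    simp only [Option.map_some, Option.some_inj] at hmap
    show extractGoA parts = altScan s.toList true
    rw [goA_eq, hmap, splitOn_single, ← (scan_eq s.toList).1]
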